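-- pv_equiv track=rewrite | github.com/eehut/lcd_bitmap_editor | convert_vertical_to_horizontal.py | decode_vertical_pattern
-- ===== SOURCE A (Python) =====
-- def decode_vertical_pattern(data, width, height):
--     """
--     纵向取模解码：从上到下，从左到右
--     返回一个二维数组，[行][列] = 0或1
--     """
--     bytes_per_column = (height + 7) // 8
--     pattern = []
--
--     for row in range(height):
--         line = []
--         for col in range(width):
--             # 计算字节索引：第col列的字节索引
--             col_byte_idx = col * bytes_per_column + (row // 8)
--             bit_in_byte = row % 8
--
--             if col_byte_idx < len(data):
--                 byte = data[col_byte_idx]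
--                 val = byte & (0x80 >> bit_in_byte)
--             else:
--                 val = 0
--             line.append(1 if val else 0)
--         pattern.append(line)
--
--     return pattern
-- ===== SOURCE B (Python) =====
-- def decode_vertical_pattern(data, width, height):
--     """
--     Vertical-scan decode, scatter style: pre-allocate a zero grid, then make one
--     pass over the source bytes in column-major order and scatter each byte's
--     bits (MSB first) down its column.
--     """
--     if height <= 0:
--         return []
--     bytes_per_column = (height + 7) // 8
--     pattern = [[0] * width for _ in range(height)]
--
--     for col in range(width):
--         for b in range(bytes_per_column):
--             idx = col * bytes_per_column + b
--             if idx >= len(data):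
--                 continue
--             byte = data[idx]
--             for bit in range(8):
--                 row = b * 8 + bit
--                 if row < height:
--                     pattern[row][col] = 1 if (byte & (0x80 >> bit)) else 0
--     return pattern
-- ===== Notes on version B (the rewrite author's own statement) =====
-- stated objective: alternative
-- what changed: A gathers: for every (row, col) cell it recomputes the source byte index and pulls the bit; B pre-allocates a zero grid and makes one column-major pass over the source bytes, scattering each byte's 8 bits down its column and skipping bytes past the end of data (the zero initialisation supplies A's out-of-range fallback).
import Mathlib
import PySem

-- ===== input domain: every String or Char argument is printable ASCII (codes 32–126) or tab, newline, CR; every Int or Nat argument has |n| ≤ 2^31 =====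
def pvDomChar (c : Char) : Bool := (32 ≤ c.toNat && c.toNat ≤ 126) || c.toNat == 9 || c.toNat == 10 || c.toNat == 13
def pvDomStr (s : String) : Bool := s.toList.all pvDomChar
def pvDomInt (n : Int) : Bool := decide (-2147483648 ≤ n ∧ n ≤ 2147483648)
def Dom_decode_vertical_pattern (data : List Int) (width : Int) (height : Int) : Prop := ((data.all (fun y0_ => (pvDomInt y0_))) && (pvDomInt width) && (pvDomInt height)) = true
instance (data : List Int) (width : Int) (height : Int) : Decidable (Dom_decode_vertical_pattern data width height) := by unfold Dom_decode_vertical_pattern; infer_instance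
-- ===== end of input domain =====

-- B replaces A's per-cell gather (row-major nested loops pulling each cell's source byte)
-- by a zero-initialised grid plus a single column-major pass over the source bytes that
-- scatters each byte's bits down its column; objective: alternative decomposition, same cost.

-- ===== PORT A =====
-- range(n) over a Python int n is exact as List.range n.toNat (empty for n ≤ 0); for the
-- Nat loop variables row//8 and row%8 are exactly Nat / and % ; 0x80 >> k is (128:Int) >>> k.
def decode_vertical_pattern (data : List Int) (width : Int) (height : Int) : List (List Int) :=
  let bytes_per_column : Int := PySem.Int.floordiv (height + 7) 8
  (List.range height.toNat).map (fun (row : Nat) =>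
    (List.range width.toNat).map (fun (col : Nat) =>
      let col_byte_idx : Int := (col : Int) * bytes_per_column + ((row / 8 : Nat) : Int)
      let bit_in_byte : Nat := row % 8
      let val : Int :=
        if col_byte_idx < (data.length : Int) then
          -- guarded by col_byte_idx < len(data) and col_byte_idx ≥ 0, so pyGet? is some; getD 0 is unreachable
          PySem.Int.band ((PySem.List.pyGet? data col_byte_idx).getD 0) ((128 : Int) >>> bit_in_byte)
        else 0
      if val ≠ 0 then (1 : Int) else 0))

-- ===== PORT B =====
-- pattern[row][col] = v  (row < height and col < width are guaranteed by Source B's guards)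
def setCell (pat : List (List Int)) (r c : Nat) (v : Int) : List (List Int) :=
  pat.set r ((pat.getD r []).set c v)

-- Source B's innermost loop body: if row < height: pattern[row][col] = 1 if (byte & (0x80 >> bit)) else 0
def bitStep (byte : Int) (c b H : Nat) (pat : List (List Int)) (bit : Nat) : List (List Int) :=
  if b * 8 + bit < H then
    setCell pat (b * 8 + bit) c (if PySem.Int.band byte ((128 : Int) >>> bit) ≠ 0 then 1 else 0)
  else pat

-- Source B's innermost loop: for bit in range(8): scatter byte's bits down column c
def scatterBits (byte : Int) (c b H : Nat) (pat : List (List Int)) : List (List Int) :=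
  (List.range 8).foldl (bitStep byte c b H) pat

-- Source B's middle loop body: skip if idx >= len(data), else scatter byte data[idx]
def byteStep (data : List Int) (B c H : Nat) (pat : List (List Int)) (b : Nat) : List (List Int) :=
  if c * B + b ≥ data.length then pat
  else scatterBits (data.getD (c * B + b) 0) c b H pat

-- Source B's middle loop: for b in range(bytes_per_column)
def scatterColumn (data : List Int) (B c H : Nat) (pat : List (List Int)) : List (List Int) :=
  (List.range B).foldl (byteStep data B c H) pat

def decode_vertical_pattern_alt (data : List Int) (width : Int) (height : Int) : List (List Int) :=
  if height ≤ 0 then []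
  else
  let bytes_per_column : Int := PySem.Int.floordiv (height + 7) 8
  let init : List (List Int) := List.replicate height.toNat (List.replicate width.toNat 0)
  (List.range width.toNat).foldl (fun pat col =>
    scatterColumn data bytes_per_column.toNat col height.toNat pat) init

-- ===== PRECONDITION & SPEC =====
def Spec_decode_vertical_pattern (data : List Int) (width : Int) (height : Int) (out : List (List Int)) : Prop := out = decode_vertical_pattern_alt data width height
instance (data : List Int) (width : Int) (height : Int) (out : List (List Int)) : Decidable (Spec_decode_vertical_pattern data width height out) := by unfold Spec_decode_vertical_pattern; infer_instance

-- ===== CLAIM (what is proved, stated in full; the proofs are below) =====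
def Claim_equal_decode_vertical_pattern : Prop := ∀ (data : List Int) (width : Int) (height : Int), Dom_decode_vertical_pattern data width height → Spec_decode_vertical_pattern data width height (decode_vertical_pattern data width height)

-- ===== LEMMAS AND PROOFS =====

-- the value of cell (r, c), as A computes it (Nat form; B = bytes per column)
def cellVal (data : List Int) (B r c : Nat) : Int :=
  if c * B + r / 8 < data.length then
    (if PySem.Int.band (data.getD (c * B + r / 8) 0) ((128 : Int) >>> (r % 8)) ≠ 0 then 1 else 0)
  else 0

def entryG (g : List (List Int)) (r c : Nat) : Int := (g.getD r []).getD c 0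

def ShapeG (g : List (List Int)) (H W : Nat) : Prop :=
  g.length = H ∧ ∀ r, r < H → (g.getD r []).length = W

theorem getD_set_eq {α : Type} [Inhabited α] (l : List α) (i j : Nat) (a d : α) :
    (l.set i a).getD j d = if i = j ∧ i < l.length then a else l.getD j d := by
  simp only [List.getD_eq_getElem?_getD, List.getElem?_set]
  split_ifs with h1 h2 h3 h4 <;> simp_all <;> omega

theorem shape_setCell {g : List (List Int)} {H W r0 c0 : Nat} (h : ShapeG g H W) (v : Int) :
    ShapeG (setCell g r0 c0 v) H W := by
  obtain ⟨hl, hrow⟩ := h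
  refine ⟨by simp [setCell, hl], ?_⟩
  intro r hr
  rw [setCell, getD_set_eq]
  split_ifs with h1
  · rw [List.length_set]
    exact h1.1 ▸ hrow r hr
  · exact hrow r hr

theorem entry_setCell {g : List (List Int)} {H W : Nat} (h : ShapeG g H W)
    {r0 c0 : Nat} (hr0 : r0 < H) (hc0 : c0 < W) (v : Int) (r c : Nat) :
    entryG (setCell g r0 c0 v) r c = if r = r0 ∧ c = c0 then v else entryG g r c := by
  obtain ⟨hl, hrow⟩ := h
  have hr0l : r0 < g.length := by omega
  have hc0l : c0 < (g.getD r0 []).length := by rw [hrow r0 hr0]; exact hc0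
  rw [entryG, setCell, getD_set_eq]
  by_cases hr : r0 = r
  · subst hr
    rw [if_pos ⟨rfl, hr0l⟩, getD_set_eq]
    by_cases hc : c0 = c
    · subst hc
      rw [if_pos ⟨rfl, hc0l⟩, if_pos ⟨rfl, rfl⟩]
    · rw [if_neg (by tauto), if_neg (by tauto), entryG]
  · rw [if_neg (by tauto)]
    rw [if_neg (by tauto), entryG]

theorem grid_eq_of_entries {g : List (List Int)} {H W : Nat} (h : ShapeG g H W)
    (f : Nat → Nat → Int) (he : ∀ r c, r < H → c < W → entryG g r c = f r c) :
    g = (List.range H).map (fun r => (List.range W).map (fun c => f r c)) := by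
  obtain ⟨hl, hrow⟩ := h
  apply List.ext_getElem (by simpa using hl)
  intro r hr1 hr2
  have hrH : r < H := by omega
  have hgr : g.getD r [] = g[r] := List.getD_eq_getElem g [] hr1
  have hrowlen : g[r].length = W := by rw [← hgr]; exact hrow r hrH
  simp only [List.getElem_map, List.getElem_range]
  apply List.ext_getElem (by simpa using hrowlen)
  intro c hc1 hc2
  have hcW : c < W := by omega
  simp only [List.getElem_map, List.getElem_range]
  have hv := he r c hrH hcW
  rw [entryG, hgr, List.getD_eq_getElem _ _ hc1] at hv
  exact hv

theorem decode_A_eq (data : List Int) (width height : Int) :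
    decode_vertical_pattern data width height =
      (List.range height.toNat).map (fun r =>
        (List.range width.toNat).map (fun c =>
          cellVal data ((height.toNat + 7) / 8) r c)) := by
  unfold decode_vertical_pattern
  apply List.map_congr_left
  intro r hr
  simp only [List.mem_range] at hr
  apply List.map_congr_left
  intro c hc
  simp only [List.mem_range] at hc
  dsimp only
  have hh : 1 ≤ height := by omega
  have hbpc : PySem.Int.floordiv (height + 7) 8 = ((height.toNat + 7) / 8 : Nat) := by
    rw [show height + 7 = ((height.toNat + 7 : Nat) : Int) by omega]
    exact_mod_cast PySem.Int.floordiv_natCast (height.toNat + 7) 8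
  rw [hbpc]
  rw [show (c : Int) * ((((height.toNat + 7) / 8 : Nat)) : Int) + ((r / 8 : Nat) : Int)
        = ((c * ((height.toNat + 7) / 8) + r / 8 : Nat) : Int) by push_cast; ring]
  rw [cellVal]
  have hget : (PySem.List.pyGet? data ((c * ((height.toNat + 7) / 8) + r / 8 : Nat) : Int)).getD 0
      = data.getD (c * ((height.toNat + 7) / 8) + r / 8) 0 := by
    rw [PySem.List.pyGet?_natCast, List.getD_eq_getElem?_getD]
  rw [hget]
  split_ifs <;> first | rfl | omega

theorem bits_fold (byte : Int) {c b H W : Nat} (hc : c < W) :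
    ∀ (L : List Nat) (g : List (List Int)), (∀ x ∈ L, x < 8) → ShapeG g H W →
      ShapeG (L.foldl (bitStep byte c b H) g) H W ∧
      ∀ r c', entryG (L.foldl (bitStep byte c b H) g) r c' =
        if c' = c ∧ r < H ∧ r / 8 = b ∧ r % 8 ∈ L then
          (if PySem.Int.band byte ((128 : Int) >>> (r % 8)) ≠ 0 then 1 else 0)
        else entryG g r c' := by
  intro L
  induction L with
  | nil => intro g _ hg; exact ⟨hg, by simp⟩
  | cons bit L ih =>
    intro g hL hg
    have hbit : bit < 8 := hL bit (by simp)
    have hL' : ∀ x ∈ L, x < 8 := fun x hx => hL x (by simp [hx])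
    simp only [List.foldl_cons]
    have hg' : ShapeG (bitStep byte c b H g bit) H W := by
      rw [bitStep]
      by_cases hrowH : b * 8 + bit < H
      · rw [if_pos hrowH]; exact shape_setCell hg _
      · rw [if_neg hrowH]; exact hg
    obtain ⟨ihS, ihE⟩ := ih (bitStep byte c b H g bit) hL' hg'
    refine ⟨ihS, ?_⟩
    intro r c'
    rw [ihE r c']
    have hstep : entryG (bitStep byte c b H g bit) r c' =
        if c' = c ∧ r < H ∧ r / 8 = b ∧ r % 8 = bit then
          (if PySem.Int.band byte ((128 : Int) >>> (r % 8)) ≠ 0 then 1 else 0)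
        else entryG g r c' := by
      rw [bitStep]
      by_cases hrowH : b * 8 + bit < H
      · rw [if_pos hrowH, entry_setCell hg hrowH hc]
        by_cases hit : r = b * 8 + bit ∧ c' = c
        · have hcond : c' = c ∧ r < H ∧ r / 8 = b ∧ r % 8 = bit :=
            ⟨hit.2, by omega, by omega, by omega⟩
          rw [if_pos hit, if_pos hcond, show r % 8 = bit from by omega]
        · rw [if_neg hit, if_neg (by rintro ⟨h1, h2, h3, h4⟩; exact hit ⟨by omega, h1⟩)]
      · rw [if_neg hrowH, if_neg (by rintro ⟨h1, h2, h3, h4⟩; omega)]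
    rw [hstep]
    simp only [List.mem_cons]
    split_ifs <;> tauto

theorem bytes_fold (data : List Int) {B c H W : Nat} (hc : c < W) :
    ∀ (L : List Nat) (g : List (List Int)), ShapeG g H W →
      ShapeG (L.foldl (byteStep data B c H) g) H W ∧
      ∀ r c', entryG (L.foldl (byteStep data B c H) g) r c' =
        if c' = c ∧ r < H ∧ r / 8 ∈ L ∧ c * B + r / 8 < data.length then
          (if PySem.Int.band (data.getD (c * B + r / 8) 0) ((128 : Int) >>> (r % 8)) ≠ 0 then 1 else 0)
        else entryG g r c' := by
  intro L
  induction L with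
  | nil => intro g hg; exact ⟨hg, by simp⟩
  | cons b L ih =>
    intro g hg
    simp only [List.foldl_cons]
    have hg' : ShapeG (byteStep data B c H g b) H W := by
      rw [byteStep]
      by_cases hlen : c * B + b ≥ data.length
      · rw [if_pos hlen]; exact hg
      · rw [if_neg hlen, scatterBits]
        exact (bits_fold _ hc (List.range 8) g (by simp) hg).1
    obtain ⟨ihS, ihE⟩ := ih (byteStep data B c H g b) hg'
    refine ⟨ihS, ?_⟩
    intro r c'
    rw [ihE r c']
    have hstep : entryG (byteStep data B c H g b) r c' =
        if c' = c ∧ r < H ∧ r / 8 = b ∧ c * B + r / 8 < data.length then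
          (if PySem.Int.band (data.getD (c * B + r / 8) 0) ((128 : Int) >>> (r % 8)) ≠ 0 then 1 else 0)
        else entryG g r c' := by
      rw [byteStep]
      by_cases hlen : c * B + b ≥ data.length
      · rw [if_pos hlen, if_neg (by rintro ⟨h1, h2, h3, h4⟩; omega)]
      · rw [if_neg hlen, scatterBits, (bits_fold _ hc (List.range 8) g (by simp) hg).2 r c']
        simp only [List.mem_range]
        by_cases hcond : c' = c ∧ r < H ∧ r / 8 = b
        · have h1 : c' = c ∧ r < H ∧ r / 8 = b ∧ r % 8 < 8 :=
            ⟨hcond.1, hcond.2.1, hcond.2.2, by omega⟩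
          have h2 : c' = c ∧ r < H ∧ r / 8 = b ∧ c * B + r / 8 < data.length :=
            ⟨hcond.1, hcond.2.1, hcond.2.2, by omega⟩
          rw [if_pos h1, if_pos h2, show c * B + b = c * B + r / 8 from by omega]
        · rw [if_neg (by tauto), if_neg (by tauto)]
    rw [hstep]
    simp only [List.mem_cons]
    by_cases hcc : c' = c
    · subst hcc
      split_ifs <;> first | rfl | tauto
    · rw [if_neg (by tauto), if_neg (by tauto), if_neg (by tauto)]

theorem cols_fold (data : List Int) {B H W : Nat} :
    ∀ (L : List Nat) (g : List (List Int)), (∀ x ∈ L, x < W) → ShapeG g H W →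
      ShapeG (L.foldl (fun pat col => scatterColumn data B col H pat) g) H W ∧
      ∀ r c', entryG (L.foldl (fun pat col => scatterColumn data B col H pat) g) r c' =
        if c' ∈ L ∧ r < H ∧ r / 8 < B ∧ c' * B + r / 8 < data.length then
          (if PySem.Int.band (data.getD (c' * B + r / 8) 0) ((128 : Int) >>> (r % 8)) ≠ 0 then 1 else 0)
        else entryG g r c' := by
  intro L
  induction L with
  | nil => intro g _ hg; exact ⟨hg, by simp⟩
  | cons c L ih =>
    intro g hL hg
    have hcW : c < W := hL c (by simp)
    have hL' : ∀ x ∈ L, x < W := fun x hx => hL x (by simp [hx])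
    simp only [List.foldl_cons]
    have hg' : ShapeG (scatterColumn data B c H g) H W := by
      rw [scatterColumn]
      exact (bytes_fold data hcW (List.range B) g hg).1
    obtain ⟨ihS, ihE⟩ := ih (scatterColumn data B c H g) hL' hg'
    refine ⟨ihS, ?_⟩
    intro r c'
    rw [ihE r c']
    have hstep : entryG (scatterColumn data B c H g) r c' =
        if c' = c ∧ r < H ∧ r / 8 < B ∧ c' * B + r / 8 < data.length then
          (if PySem.Int.band (data.getD (c' * B + r / 8) 0) ((128 : Int) >>> (r % 8)) ≠ 0 then 1 else 0)
        else entryG g r c' := by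
      rw [scatterColumn, (bytes_fold data hcW (List.range B) g hg).2 r c']
      simp only [List.mem_range]
      by_cases hcc : c' = c
      · subst hcc
        split_ifs <;> rfl
      · rw [if_neg (by tauto), if_neg (by tauto)]
    rw [hstep]
    simp only [List.mem_cons]
    by_cases hcc : c' = c
    · subst hcc
      simp only [true_and, true_or]
      split_ifs <;> first | rfl | tauto
    · rw [if_neg (show ¬(c' = c ∧ r < H ∧ r / 8 < B ∧ c' * B + r / 8 < data.length) from by tauto)]
      split_ifs <;> first | rfl | tauto

theorem decode_B_eq (data : List Int) (width height : Int) :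
    decode_vertical_pattern_alt data width height =
      (List.range height.toNat).map (fun r =>
        (List.range width.toNat).map (fun c =>
          cellVal data ((height.toNat + 7) / 8) r c)) := by
  unfold decode_vertical_pattern_alt
  by_cases hneg : height ≤ 0
  · rw [if_pos hneg]
    rw [show height.toNat = 0 from by omega]
    simp
  rw [if_neg hneg]
  dsimp only
  have hinit : ShapeG (List.replicate height.toNat (List.replicate width.toNat (0 : Int)))
      height.toNat width.toNat :=
    ⟨by simp, fun r hr => by
      simp [List.getD_eq_getElem?_getD, hr]⟩
  have hentry0 : ∀ r c,
      entryG (List.replicate height.toNat (List.replicate width.toNat (0 : Int))) r c = 0 := by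
    intro r c
    simp only [entryG, List.getD_eq_getElem?_getD, List.getElem?_replicate]
    split_ifs <;> simp
  obtain ⟨hS, hE⟩ := cols_fold data (List.range width.toNat)
    (List.replicate height.toNat (List.replicate width.toNat (0 : Int))) (by simp) hinit
  apply grid_eq_of_entries hS
  intro r c hrH hcW
  rw [hE r c, hentry0 r c]
  have hh : 1 ≤ height := by omega
  have hB : (PySem.Int.floordiv (height + 7) 8).toNat = (height.toNat + 7) / 8 := by
    rw [show height + 7 = ((height.toNat + 7 : Nat) : Int) by omega]
    rw [show ((8 : Int)) = ((8 : Nat) : Int) by norm_num, PySem.Int.floordiv_natCast]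
    exact Int.toNat_natCast _
  rw [hB, cellVal]
  simp only [List.mem_range]
  by_cases hidx : c * ((height.toNat + 7) / 8) + r / 8 < data.length
  · rw [if_pos ⟨hcW, hrH, by omega, hidx⟩, if_pos hidx]
  · rw [if_neg (by tauto), if_neg hidx]

-- ===== VERDICT (by name: the statement is the Claim_ definition above) =====
theorem decode_vertical_pattern_spec : Claim_equal_decode_vertical_pattern := by
  intro data width height _
  unfold Spec_decode_vertical_pattern
  rw [decode_A_eq, decode_B_eq]
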